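-- pv_equiv track=rewrite | github.com/womullan/operations_milestones | opsAdmin.py | find_duplicate_displayname_users
-- ===== SOURCE A (Python) =====
-- from typing import Dict, List
--
-- def find_duplicate_displayname_users(users: List[Dict]):
--     """Simple duplicate finder that uses only displayName and 'startswith' matching.
--
--     For each user's displayName (base), it finds other users whose displayName
--     starts with that base (case-insensitive). If matches are found, the function
--     returns a dict keyed by the base displayName with aggregated emails and the
--     collected user dicts. This keeps the output shape compatible with existing callers.
--     """
--     # Build a mapping from displayName to list of users with that exact displayName
--     dups = {}
--     skip = ["Peter", "Product Requirements Guide", "Work Organizer", "Brand Voice Crafter"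
--             "Lucidchart Diagrams Connector for Jira", "Opsgenie Incident Timeline",
--             "migrate-jira-34f7173f-c7ca-4a05-82c6-d7f88d2266ec", "Jira Workflow Toolbox Cloud",
--             "Lucidchart Diagrams Connector"]
--     for u in users:
--         dn = u.get('displayName')
--         if not dn or dn in dups:
--             continue
--         # find other names that start with base (case-insensitive), excluding exact match
--         for trymatch in users:
--             if trymatch != u :
--                 odn = trymatch.get('displayName')
--                 if dn.startswith(odn):  # got a dup
--                     if odn != "Peter" and dn not in skip:
--                         if not dn in dups:
--                             dups[dn]=[u]
--                         dups[dn].append(trymatch)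
--
--     return dups
-- ===== SOURCE B (Python) =====
-- from typing import Dict, List
--
-- def find_duplicate_displayname_users(users: List[Dict]):
--     """Index users by exact displayName once; for each base name test only its
--     own prefixes against the index instead of rescanning all users."""
--     skip = ["Peter", "Product Requirements Guide", "Work Organizer", "Brand Voice Crafter"
--             "Lucidchart Diagrams Connector for Jira", "Opsgenie Incident Timeline",
--             "migrate-jira-34f7173f-c7ca-4a05-82c6-d7f88d2266ec", "Jira Workflow Toolbox Cloud",
--             "Lucidchart Diagrams Connector"]
--     index = {}
--     for i, t in enumerate(users):
--         odn = t.get('displayName')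
--         if odn is not None:
--             index.setdefault(odn, []).append((i, t))
--     dups = {}
--     for u in users:
--         dn = u.get('displayName')
--         if not dn or dn in dups or dn in skip:
--             continue
--         found = []
--         for j in range(len(dn) + 1):
--             p = dn[:j]
--             if p == "Peter":
--                 continue
--             for i, t in index.get(p, []):
--                 if t != u:
--                     found.append((i, t))
--         if found:
--             found.sort(key=lambda e: e[0])
--             dups[dn] = [u] + [t for _, t in found]
--     return dups
-- ===== Notes on version B (the rewrite author's own statement) =====
-- stated objective: alternative
-- what changed: B builds a dict indexing users by exact displayName in one enumerate pass and, for each base name, probes only its len+1 prefixes in that index (merging hits by original position), replacing A's nested all-pairs startswith rescan of the user list.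
import Mathlib
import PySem

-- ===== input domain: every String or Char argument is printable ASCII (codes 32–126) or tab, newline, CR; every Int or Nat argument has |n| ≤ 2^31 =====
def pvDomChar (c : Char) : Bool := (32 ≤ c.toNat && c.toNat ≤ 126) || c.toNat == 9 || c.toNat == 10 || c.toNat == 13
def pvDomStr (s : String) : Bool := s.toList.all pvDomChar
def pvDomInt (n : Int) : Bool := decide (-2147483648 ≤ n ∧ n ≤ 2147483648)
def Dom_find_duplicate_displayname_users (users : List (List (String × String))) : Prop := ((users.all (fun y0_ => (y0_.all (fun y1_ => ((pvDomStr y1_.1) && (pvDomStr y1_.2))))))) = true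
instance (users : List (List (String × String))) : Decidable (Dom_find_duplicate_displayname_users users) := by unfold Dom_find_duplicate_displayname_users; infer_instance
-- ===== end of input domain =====

-- B replaces A's nested all-pairs displayName scan by a dict indexing users by exact
-- displayName once and probing only the prefixes of each base name (objective: alternative).

-- shared helpers: the module-level skip list (the missing comma between "Brand Voice Crafter"
-- and "Lucidchart Diagrams Connector for Jira" in the Python source concatenates them — kept);
-- u.get('displayName') and Python's '==' on dicts, exact on assoc-list inputs via PySem.Dict
def pvSkip : List String := ["Peter", "Product Requirements Guide", "Work Organizer",
  "Brand Voice CrafterLucidchart Diagrams Connector for Jira", "Opsgenie Incident Timeline",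
  "migrate-jira-34f7173f-c7ca-4a05-82c6-d7f88d2266ec", "Jira Workflow Toolbox Cloud",
  "Lucidchart Diagrams Connector"]

def pvGetDN (u : List (String × String)) : Option String :=
  (PySem.Dict.ofList u).get? "displayName"

-- Python dict '==': same key set and the same value at every key (insertion order ignored)
def pvDictEq (a b : List (String × String)) : Bool :=
  PySem.Set.equal (PySem.Dict.ofList a).keys (PySem.Dict.ofList b).keys &&
  (PySem.Dict.ofList a).keys.all
    (fun k => (PySem.Dict.ofList a).get? k == (PySem.Dict.ofList b).get? k)

-- ===== PORT A =====
-- inner 'for trymatch in users' body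
def pvInnerA (u : List (String × String)) (dn : String)
    (dups : PySem.Dict String (List (List (String × String))))
    (t : List (String × String)) : PySem.Dict String (List (List (String × String))) :=
  if pvDictEq t u then dups
  else
    match pvGetDN t with
    | none => dups          -- Python raises TypeError (dn.startswith(None)); excluded by Pre_
    | some odn =>
      if PySem.Str.startswith dn odn then
        if odn ≠ "Peter" ∧ dn ∉ pvSkip then
          -- if not dn in dups: dups[dn]=[u];  dups[dn].append(trymatch)
          let d1 := if dups.contains dn then dups else dups.insert dn [u]
          d1.modify dn [] (· ++ [t])
        else dups
      else dups

-- outer 'for u in users' body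
def pvOuterA (users : List (List (String × String)))
    (dups : PySem.Dict String (List (List (String × String))))
    (u : List (String × String)) : PySem.Dict String (List (List (String × String))) :=
  match pvGetDN u with
  | none => dups
  | some dn =>
    if dn = "" ∨ dups.contains dn then dups
    else users.foldl (pvInnerA u dn) dups

def find_duplicate_displayname_users (users : List (List (String × String))) :
    List (String × List (List (String × String))) :=
  (users.foldl (pvOuterA users) PySem.Dict.empty).items

-- ===== PORT B =====
-- index.setdefault(odn, []).append((i, t))  (one enumerate pass)
def pvStepIdx (idx : PySem.Dict String (List (Int × List (String × String))))
    (e : Int × List (String × String)) : PySem.Dict String (List (Int × List (String × String))) :=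
  match pvGetDN e.2 with
  | none => idx
  | some odn => idx.modify odn [] (· ++ [e])

def pvBuckets (users : List (List (String × String))) :
    PySem.Dict String (List (Int × List (String × String))) :=
  (PySem.List.enumerate users).foldl pvStepIdx PySem.Dict.empty

-- for j in range(len(dn)+1): p = dn[:j]; probe index[p]
def pvFound (index : PySem.Dict String (List (Int × List (String × String))))
    (u : List (String × String)) (dn : String) : List (Int × List (String × String)) :=
  (List.range ((PySem.Str.len dn).toNat + 1)).foldl
    (fun acc (j : Nat) =>
      let p := PySem.Str.slice dn none (some (j : Int))
      if p = "Peter" then acc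
      else acc ++ (index.getD p []).filter (fun e => !(pvDictEq e.2 u)))
    []

def pvOuterB (index : PySem.Dict String (List (Int × List (String × String))))
    (dups : PySem.Dict String (List (List (String × String))))
    (u : List (String × String)) : PySem.Dict String (List (List (String × String))) :=
  match pvGetDN u with
  | none => dups
  | some dn =>
    if dn = "" ∨ dups.contains dn ∨ dn ∈ pvSkip then dups
    else
      let found := pvFound index u dn
      if found = [] then dups
      else dups.insert dn ([u] ++ (PySem.List.sorted found (·.1)).map (·.2))

def find_duplicate_displayname_users_alt (users : List (List (String × String))) :
    List (String × List (List (String × String))) :=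
  (users.foldl (pvOuterB (pvBuckets users)) PySem.Dict.empty).items

-- ===== PRECONDITION & SPEC =====
-- Pre_ excludes exactly the inputs where A raises TypeError: some user has a non-empty
-- displayName (so the inner scan runs dn.startswith(odn)) while another user lacks the
-- 'displayName' key entirely (odn is None).
def Pre_find_duplicate_displayname_users (users : List (List (String × String))) : Prop :=
  (∀ t ∈ users, (pvGetDN t).isSome = true) ∨ (∀ u ∈ users, (pvGetDN u).getD "" = "")
instance (users : List (List (String × String))) : Decidable (Pre_find_duplicate_displayname_users users) := by
  unfold Pre_find_duplicate_displayname_users; infer_instance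

def pvWitness_find_duplicate_displayname_users : (List (List (String × String))) :=
  [[("displayName", "ab"), ("email", "x@y")], [("displayName", "a")]]

def Spec_find_duplicate_displayname_users (users : List (List (String × String))) (out : List (String × List (List (String × String)))) : Prop := out = find_duplicate_displayname_users_alt users
instance (users : List (List (String × String))) (out : List (String × List (List (String × String)))) : Decidable (Spec_find_duplicate_displayname_users users out) := by unfold Spec_find_duplicate_displayname_users; infer_instance

-- ===== CLAIM (what is proved, stated in full; the proofs are below) =====
def Claim_equal_find_duplicate_displayname_users : Prop := ∀ (users : List (List (String × String))), Dom_find_duplicate_displayname_users users → Pre_find_duplicate_displayname_users users → Spec_find_duplicate_displayname_users users (find_duplicate_displayname_users users)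


-- ===== LEMMAS AND PROOFS =====

-- the match condition of A's inner loop (minus the dn-∉-skip conjunct, handled outside)
def pvCond (u : List (String × String)) (dn : String) (t : List (String × String)) : Bool :=
  !(pvDictEq t u) &&
    (match pvGetDN t with
     | none => false
     | some odn => PySem.Str.startswith dn odn && !(odn == "Peter"))

lemma pv_modify_eq_insert {ν : Type} (d : PySem.Dict String ν) (k : String) (v0 : ν) (f : ν → ν) :
    d.modify k v0 f = d.insert k (f (d.getD k v0)) := PySem.Dict.ext_iff.mpr rfl

lemma pvInnerA_char (u : List (String × String)) (dn : String)
    (dups : PySem.Dict String (List (List (String × String)))) (t : List (String × String))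
    (hk : (pvGetDN t).isSome = true) (hskip : dn ∉ pvSkip) :
    pvInnerA u dn dups t =
      if pvCond u dn t then
        (if dups.contains dn then dups else dups.insert dn [u]).modify dn [] (· ++ [t])
      else dups := by
  unfold pvInnerA pvCond
  cases hdn : pvGetDN t with
  | none => rw [hdn] at hk; simp at hk
  | some odn =>
    by_cases he : pvDictEq t u
    · simp [he]
    · simp only [he, if_neg, Bool.not_eq_true, if_false]
      by_cases hsw : PySem.Chars.startswith dn.toList odn.toList
      · by_cases hp : odn = "Peter"
        · simp [PySem.Str.startswith_eq, hsw, hp, hskip]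
        · simp [PySem.Str.startswith_eq, hsw, hp, hskip, pv_modify_eq_insert]
      · simp [PySem.Str.startswith_eq, hsw]

lemma pvInnerA_skip (u : List (String × String)) (dn : String)
    (l : List (List (String × String))) (d : PySem.Dict String (List (List (String × String))))
    (hskip : dn ∈ pvSkip) : l.foldl (pvInnerA u dn) d = d := by
  induction l generalizing d with
  | nil => rfl
  | cons t l ih =>
    have hstep : pvInnerA u dn d t = d := by
      unfold pvInnerA
      cases pvGetDN t with
      | none => simp
      | some odn => by_cases he : pvDictEq t u <;>
          by_cases hsw : PySem.Chars.startswith dn.toList odn.toList <;>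
          simp [PySem.Str.startswith_eq, he, hsw, hskip]
    rw [List.foldl_cons, hstep, ih]

lemma pvInnerA_after (u : List (String × String)) (dn : String)
    (l : List (List (String × String))) (base : PySem.Dict String (List (List (String × String))))
    (v : List (List (String × String)))
    (hk : ∀ t ∈ l, (pvGetDN t).isSome = true) (hskip : dn ∉ pvSkip) :
    l.foldl (pvInnerA u dn) (base.insert dn v) =
      base.insert dn (v ++ l.filter (pvCond u dn)) := by
  induction l generalizing v with
  | nil => simp
  | cons t l ih =>
    rw [List.foldl_cons, pvInnerA_char u dn _ t (hk t (by simp)) hskip]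
    by_cases hc : pvCond u dn t
    · rw [if_pos hc, if_pos (PySem.Dict.contains_insert_self base dn v),
        pv_modify_eq_insert, PySem.Dict.getD_insert_self, PySem.Dict.insert_insert_self,
        ih (v ++ [t]) (fun x hx => hk x (by simp [hx]))]
      simp [hc, List.filter_cons]
    · rw [if_neg hc, ih v (fun x hx => hk x (by simp [hx]))]
      simp [hc, List.filter_cons]

lemma pvInnerA_main (u : List (String × String)) (dn : String)
    (l : List (List (String × String))) (d : PySem.Dict String (List (List (String × String))))
    (hk : ∀ t ∈ l, (pvGetDN t).isSome = true) (hskip : dn ∉ pvSkip)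
    (hc : d.contains dn = false) :
    l.foldl (pvInnerA u dn) d =
      if l.filter (pvCond u dn) = [] then d
      else d.insert dn ([u] ++ l.filter (pvCond u dn)) := by
  cases l with
  | nil => simp
  | cons t l =>
    rw [List.foldl_cons, pvInnerA_char u dn _ t (hk t (by simp)) hskip]
    by_cases hct : pvCond u dn t
    · rw [if_pos hct, if_neg (by simp [hc]), pv_modify_eq_insert,
        PySem.Dict.getD_insert_self, PySem.Dict.insert_insert_self,
        pvInnerA_after u dn l d ([u] ++ [t]) (fun x hx => hk x (by simp [hx])) hskip]
      simp [List.filter_cons, hct]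
    · rw [if_neg hct,
        pvInnerA_main u dn l d (fun x hx => hk x (by simp [hx])) hskip hc]
      simp [List.filter_cons, hct]

lemma pvBuckets_getD (l : List (Int × List (String × String)))
    (d : PySem.Dict String (List (Int × List (String × String)))) (p : String) :
    (l.foldl pvStepIdx d).getD p [] =
      d.getD p [] ++ l.filter (fun e => pvGetDN e.2 == some p) := by
  induction l generalizing d with
  | nil => simp
  | cons e l ih =>
    rw [List.foldl_cons]
    cases hdn : pvGetDN e.2 with
    | none =>
      have h1 : pvStepIdx d e = d := by unfold pvStepIdx; rw [hdn]
      rw [h1, ih]; simp [List.filter_cons, hdn]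
    | some odn =>
      have h1 : pvStepIdx d e = d.modify odn [] (· ++ [e]) := by unfold pvStepIdx; rw [hdn]
      rw [h1, ih]
      by_cases hp : odn = p
      · subst hp
        rw [PySem.Dict.getD_modify_self]
        simp [List.filter_cons, hdn]
      · rw [PySem.Dict.getD_modify_of_ne _ _ _ (fun h => hp h.symm)]
        simp [List.filter_cons, hdn, hp]

-- disjoint filters concatenate to the filter of the disjunction, up to permutation
lemma pv_filter_or_perm {α : Type} (a b : α → Bool) (l : List α)
    (hdisj : ∀ x, ¬(a x = true ∧ b x = true)) :
    (l.filter a ++ l.filter b).Perm (l.filter (fun x => a x || b x)) := by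
  induction l with
  | nil => simp
  | cons x l ih =>
    by_cases hax : a x
    · have hbx : b x = false := by
        cases hb : b x
        · rfl
        · exact absurd ⟨hax, hb⟩ (hdisj x)
      simpa [List.filter_cons, hax, hbx] using ih.cons x
    · by_cases hbx : b x
      · simp only [List.filter_cons, hax, hbx, Bool.false_or, Bool.or_true,
          if_true, if_false]
        exact List.perm_middle.trans (ih.cons x)
      · simpa [List.filter_cons, hax, hbx] using ih

lemma pv_flatMap_filter_perm {α : Type} (key : α → Option String) (r : α → Bool)
    (ps : List String) (hps : ps.Nodup) (l : List α) :
    (ps.flatMap (fun p => l.filter (fun e => r e && (key e == some p)))).Perm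
      (l.filter (fun e => r e && (ps.map some).contains (key e))) := by
  induction ps with
  | nil => simp
  | cons p ps ih =>
    have hp : p ∉ ps := by simp_all
    have hps' : ps.Nodup := hps.of_cons
    rw [List.flatMap_cons]
    refine ((ih hps').append_left _).trans ?_
    refine (pv_filter_or_perm _ _ l ?_).trans ?_
    · rintro x ⟨h1, h2⟩
      simp only [Bool.and_eq_true, beq_iff_eq] at h1 h2
      rcases h2.2 with h2'
      rw [h1.2] at h2'
      simp only [List.contains_iff_exists_mem_beq, List.mem_map] at h2'
      obtain ⟨a, ⟨q, hq, rfl⟩, hbeq⟩ := h2'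
      simp only [beq_iff_eq, Option.some.injEq] at hbeq
      exact hp (hbeq ▸ hq)
    · apply List.Perm.of_eq
      apply List.filter_congr
      intro x _
      cases hk : key x with
      | none => simp
      | some q => by_cases hq : q = p <;> simp [hq] <;> tauto

lemma pv_flatMap_if_filter {α β : Type} [DecidableEq α] (ps : List α) (c : α) (h : α → List β) :
    (ps.flatMap (fun p => if p = c then [] else h p)) = (ps.filter (· ≠ c)).flatMap h := by
  induction ps with
  | nil => simp
  | cons p ps ih =>
    by_cases hp : p = c <;> simp [List.filter_cons, hp, ih]

def pvPrefixes (dn : String) : List String :=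
  (List.range ((PySem.Str.len dn).toNat + 1)).map
    (fun (j : Nat) => PySem.Str.slice dn none (some (j : Int)))

lemma pv_slice_toList (dn : String) (j : Nat) :
    (PySem.Str.slice dn none (some (j : Int))).toList = dn.toList.take j := by
  simp [PySem.Str.toList_slice, PySem.List.slice_to dn.toList (by positivity : (0:Int) ≤ (j:Int))]

lemma pv_len_toNat (dn : String) : (PySem.Str.len dn).toNat = dn.toList.length := by
  rw [PySem.Str.len_eq]; exact Int.toNat_natCast _

-- membership in the prefix list = startswith
lemma pv_mem_prefixes (dn p : String) :
    p ∈ pvPrefixes dn ↔ PySem.Str.startswith dn p = true := by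
  unfold pvPrefixes
  rw [PySem.Str.startswith_eq, PySem.Chars.startswith_iff]
  constructor
  · intro hmem
    obtain ⟨j, _, rfl⟩ := List.mem_map.mp hmem
    rw [pv_slice_toList]
    exact List.take_prefix _ _
  · intro hsw
    refine List.mem_map.mpr ⟨p.toList.length, ?_, ?_⟩
    · rw [List.mem_range, pv_len_toNat]
      have := hsw.length_le
      omega
    · apply String.toList_inj.mp
      rw [pv_slice_toList]
      exact (List.prefix_iff_eq_take.mp hsw).symm

lemma pv_prefixes_nodup (dn : String) : (pvPrefixes dn).Nodup := by
  unfold pvPrefixes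
  refine List.Nodup.map_on ?_ (List.nodup_range)
  intro j1 h1 j2 h2 heq
  rw [List.mem_range, pv_len_toNat] at h1 h2
  have := congrArg (fun s => s.toList.length) heq
  simp only [pv_slice_toList, List.length_take] at this
  omega

lemma pvFound_perm (users : List (List (String × String))) (u : List (String × String))
    (dn : String) :
    (pvFound (pvBuckets users) u dn).Perm
      ((PySem.List.enumerate users).filter (fun e => pvCond u dn e.2)) := by
  have hfold : ∀ (l : List Nat) (acc : List (Int × List (String × String))),
      l.foldl (fun acc (j : Nat) =>
        let p := PySem.Str.slice dn none (some (j : Int))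
        if p = "Peter" then acc
        else acc ++ ((pvBuckets users).getD p []).filter (fun e => !(pvDictEq e.2 u))) acc
      = acc ++ l.flatMap (fun (j : Nat) =>
          if PySem.Str.slice dn none (some (j : Int)) = "Peter" then []
          else ((pvBuckets users).getD (PySem.Str.slice dn none (some (j : Int))) []).filter
            (fun e => !(pvDictEq e.2 u))) := by
    intro l
    induction l with
    | nil => simp
    | cons j l ih =>
      intro acc
      rw [List.foldl_cons, List.flatMap_cons]
      by_cases hp : PySem.Str.slice dn none (some (j : Int)) = "Peter" <;>
        simp [hp, ih, List.append_assoc]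
  have hbuck : ∀ p : String, (pvBuckets users).getD p [] =
      (PySem.List.enumerate users).filter (fun e => pvGetDN e.2 == some p) := by
    intro p
    unfold pvBuckets
    rw [pvBuckets_getD]
    simp
  have h1 : pvFound (pvBuckets users) u dn =
      ((pvPrefixes dn).filter (· ≠ "Peter")).flatMap
        (fun p => (PySem.List.enumerate users).filter
          (fun e => !(pvDictEq e.2 u) && (pvGetDN e.2 == some p))) := by
    unfold pvFound
    rw [hfold, List.nil_append, ← List.flatMap_map
      (fun (j : Nat) => PySem.Str.slice dn none (some (j : Int)))
      (fun p => if p = "Peter" then []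
        else ((pvBuckets users).getD p []).filter (fun e => !(pvDictEq e.2 u)))]
    rw [pv_flatMap_if_filter]
    show ((pvPrefixes dn).filter _).flatMap _ = _
    congr 1
    funext p
    rw [hbuck, List.filter_filter]
  rw [h1]
  refine (pv_flatMap_filter_perm
    (fun e : Int × List (String × String) => pvGetDN e.2)
    (fun e : Int × List (String × String) => !(pvDictEq e.2 u))
    _ ((pv_prefixes_nodup dn).filter _) _).trans ?_
  apply List.Perm.of_eq
  apply List.filter_congr
  intro e _
  rw [Bool.eq_iff_iff]
  simp only [Bool.and_eq_true, Bool.not_eq_eq_eq_not, Bool.not_true,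
    List.contains_iff_exists_mem_beq, List.mem_map, List.mem_filter]
  cases hdn : pvGetDN e.2 with
  | none => simp [pvCond, hdn]
  | some odn =>
    simp only [pvCond, hdn, Bool.and_eq_true, Bool.not_eq_eq_eq_not, Bool.not_true,
      beq_iff_eq, Option.some.injEq, pv_mem_prefixes, decide_eq_true_eq]
    constructor
    · rintro ⟨hne, a, ⟨q, ⟨hq1, hq2⟩, rfl⟩, hqq⟩
      simp only [beq_iff_eq, Option.some.injEq] at hqq
      subst hqq
      exact ⟨hne, hq1, by simpa using hq2⟩
    · rintro ⟨hne, hsw, hnp⟩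
      exact ⟨hne, some odn, ⟨odn, ⟨hsw, by simpa using hnp⟩, rfl⟩, by simp⟩

-- the sorted probe result of B is exactly A's in-order filtered scan, paired with indices
lemma pvFound_sorted (users : List (List (String × String))) (u : List (String × String))
    (dn : String) :
    PySem.List.sorted (pvFound (pvBuckets users) u dn) (·.1) =
      (PySem.List.enumerate users).filter (fun e => pvCond u dn e.2) := by
  refine PySem.List.sorted_eq_of_perm_of_pairwise_lt _ _ _ ((pvFound_perm users u dn).symm) ?_
  exact List.Pairwise.sublist List.filter_sublist (PySem.List.pairwise_lt_enumerate users 0)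

lemma pvFound_map_snd (users : List (List (String × String))) (u : List (String × String))
    (dn : String) :
    ((PySem.List.sorted (pvFound (pvBuckets users) u dn) (·.1)).map (·.2)) =
      users.filter (pvCond u dn) := by
  rw [pvFound_sorted]
  conv_rhs => rw [← PySem.List.map_snd_enumerate users 0]
  rw [List.filter_map]
  rfl

lemma pvFound_nil_iff (users : List (List (String × String))) (u : List (String × String))
    (dn : String) :
    (pvFound (pvBuckets users) u dn = []) ↔ users.filter (pvCond u dn) = [] := by
  have hp := pvFound_perm users u dn
  constructor
  · intro h
    rw [h] at hp
    have := hp.nil_eq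
    rw [← PySem.List.map_snd_enumerate users 0, List.filter_map]
    simp only [Function.comp_def]
    rw [← this]
    rfl
  · intro h
    apply List.eq_nil_of_length_eq_zero
    rw [hp.length_eq]
    have : ((PySem.List.enumerate users).filter (fun e => pvCond u dn e.2)).map (·.2) = [] := by
      conv_rhs => rw [← h]
      conv_lhs => rw [← pvFound_sorted users u dn]
      rw [pvFound_map_snd]
    simpa using congrArg List.length this

lemma pvOuter_eq (users : List (List (String × String)))
    (hk : ∀ t ∈ users, (pvGetDN t).isSome = true)
    (dups : PySem.Dict String (List (List (String × String)))) (u : List (String × String)) :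
    pvOuterA users dups u = pvOuterB (pvBuckets users) dups u := by
  unfold pvOuterA pvOuterB
  cases hdn : pvGetDN u with
  | none => rfl
  | some dn =>
    dsimp only
    by_cases h1 : dn = "" ∨ dups.contains dn = true
    · rw [if_pos h1, if_pos (by tauto)]
    · by_cases h2 : dn ∈ pvSkip
      · rw [if_neg h1, if_pos (by tauto), pvInnerA_skip u dn users dups h2]
      · rw [if_neg h1, if_neg (by tauto)]
        have hcontains : dups.contains dn = false := by
          rcases Bool.eq_false_or_eq_true (dups.contains dn) with h | h
          · exact absurd (Or.inr h) h1
          · exact h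
        rw [pvInnerA_main u dn users dups hk h2 hcontains]
        rw [pvFound_map_snd users u dn]
        by_cases hf : pvFound (pvBuckets users) u dn = []
        · rw [if_pos ((pvFound_nil_iff users u dn).mp hf), if_pos hf]
        · rw [if_neg (fun h => hf ((pvFound_nil_iff users u dn).mpr h)), if_neg hf]

lemma pvOuter_trivial (users : List (List (String × String)))
    (h : ∀ u ∈ users, (pvGetDN u).getD "" = "")
    (l : List (List (String × String))) (hl : ∀ u ∈ l, u ∈ users)
    (dups : PySem.Dict String (List (List (String × String)))) (step : _) 
    (hstep : step = pvOuterA users ∨ step = pvOuterB (pvBuckets users)) :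
    l.foldl step dups = dups := by
  induction l generalizing dups with
  | nil => rfl
  | cons t l ih =>
    have ht := h t (hl t (by simp))
    have hstep : step dups t = dups := by
      rcases hstep with rfl | rfl
      · unfold pvOuterA
        cases hdn : pvGetDN t with
        | none => rfl
        | some dn =>
          rw [hdn] at ht
          simp only [Option.getD_some] at ht
          simp [ht]
      · unfold pvOuterB
        cases hdn : pvGetDN t with
        | none => rfl
        | some dn =>
          rw [hdn] at ht
          simp only [Option.getD_some] at ht
          simp [ht]
    rw [List.foldl_cons, hstep, ih (fun x hx => hl x (by simp [hx])) dups]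

-- ===== VERDICT (by name: the statement is the Claim_ definition above) =====
theorem find_duplicate_displayname_users_spec : Claim_equal_find_duplicate_displayname_users := by
  intro users _ hpre
  unfold Spec_find_duplicate_displayname_users
  unfold find_duplicate_displayname_users find_duplicate_displayname_users_alt
  cases hpre with
  | inl hk =>
    rw [PySem.List.foldl_congr_mem users (pvOuterA users) (pvOuterB (pvBuckets users)) _
      (fun acc x _ => pvOuter_eq users hk acc x)]
  | inr h =>
    rw [pvOuter_trivial users h users (fun _ hu => hu) _ _ (Or.inl rfl),
        pvOuter_trivial users h users (fun _ hu => hu) _ _ (Or.inr rfl)]
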